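-- pv_equiv track=rewrite | github.com/aryaainchwar2007-cmd/VELORA | backend/velora_db/api/scripts/normalize_lessons_all_languages.py | extract_english_block
-- ===== SOURCE A (Python) =====
-- LANGS = ['ENGLISH', 'HINDI', 'MARATHI', 'TAMIL', 'TELUGU', 'KANNADA', 'MALAYALAM']
--
-- def normalize_spaces(s: str) -> str:
--     return '\n'.join(line.rstrip() for line in s.splitlines()).strip()
--
-- def extract_english_block(content: str) -> str:
--     lines = content.splitlines()
--     current = None
--     acc = {lang: [] for lang in LANGS}
--
--     for line in lines:
--         tag = line.strip().upper()
--         if tag in LANGS: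
--             current = tag
--             continue
--         if current:
--             acc[current].append(line)
--
--     english = normalize_spaces('\n'.join(acc.get('ENGLISH', [])))
--     if english:
--         return english
--     # fallback: whole content
--     return normalize_spaces(content)
-- ===== SOURCE B (Python) =====
-- LANGS = ['ENGLISH', 'HINDI', 'MARATHI', 'TAMIL', 'TELUGU', 'KANNADA', 'MALAYALAM']
--
-- def normalize_spaces(s: str) -> str:
--     return '\n'.join(line.rstrip() for line in s.splitlines()).strip()
--
-- def extract_english_block(content: str) -> str:
--     lines = content.splitlines()
--     # first pass: table of tag boundaries (line index, tag)
--     bounds = [(i, line.strip().upper()) for i, line in enumerate(lines)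
--               if line.strip().upper() in LANGS]
--     # second pass: slice out every ENGLISH-headed segment
--     ends = [i for i, _ in bounds[1:]] + [len(lines)]
--     out = []
--     for (start, tag), end in zip(bounds, ends):
--         if tag == 'ENGLISH':
--             out.extend(lines[start + 1:end])
--     english = normalize_spaces('\n'.join(out))
--     return english if english else normalize_spaces(content)
-- ===== Notes on version B (the rewrite author's own statement) =====
-- stated objective: alternative
-- what changed: Replaces A's single incremental scan, which accumulates lines into a per-language dict under a running language-tag state variable, by a two-pass decomposition: first build a table of (line index, tag) boundaries, then slice the segment between each ENGLISH boundary and the next boundary out of the line list and concatenate the slices.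
import Mathlib
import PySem

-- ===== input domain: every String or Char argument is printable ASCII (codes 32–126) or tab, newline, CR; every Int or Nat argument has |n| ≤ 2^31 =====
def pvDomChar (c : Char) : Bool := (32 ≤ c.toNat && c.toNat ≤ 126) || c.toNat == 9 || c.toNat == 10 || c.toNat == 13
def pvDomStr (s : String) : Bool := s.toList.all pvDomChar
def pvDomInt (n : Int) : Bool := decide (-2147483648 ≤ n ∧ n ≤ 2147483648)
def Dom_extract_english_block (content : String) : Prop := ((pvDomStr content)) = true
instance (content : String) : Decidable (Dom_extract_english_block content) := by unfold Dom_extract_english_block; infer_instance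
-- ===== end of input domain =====

-- B replaces A's single accumulate-into-a-dict scan by a boundary-index table plus a
-- slicing pass over consecutive boundaries (objective: alternative decomposition, same cost).

def pvLANGS : List String :=
  ["ENGLISH", "HINDI", "MARATHI", "TAMIL", "TELUGU", "KANNADA", "MALAYALAM"]

-- shared module-level helper normalize_spaces (identical in Source A and Source B)
def pvNormalizeSpaces (s : String) : String :=
  PySem.Str.strip (PySem.Str.join "\n" ((PySem.Str.splitlines s).map PySem.Str.rstrip))

-- ===== PORT A =====
def extract_english_block (content : String) : String :=
  let lines := PySem.Str.splitlines content
  let init : Option String × PySem.Dict String (List String) :=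
    (none, pvLANGS.foldl (fun d lang => d.insert lang []) PySem.Dict.empty)
  let st := lines.foldl
    (fun (st : Option String × PySem.Dict String (List String)) line =>
      let tag := PySem.Str.upper (PySem.Str.strip line)
      if pvLANGS.contains tag then (some tag, st.2)
      else
        match st.1 with
        | some cur => (st.1, st.2.modify cur [] (· ++ [line]))  -- acc[current].append(line)
        | none => st) init
  let english := pvNormalizeSpaces (PySem.Str.join "\n" (st.2.getD "ENGLISH" []))
  if english ≠ "" then english else pvNormalizeSpaces content

-- ===== PORT B =====
def pvBounds (lines : List String) : List (Int × String) :=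
  (PySem.List.enumerate lines).filterMap (fun p =>
    let tag := PySem.Str.upper (PySem.Str.strip p.2)
    if pvLANGS.contains tag then some (p.1, tag) else none)

def extract_english_block_alt (content : String) : String :=
  let lines := PySem.Str.splitlines content
  let bounds := pvBounds lines
  let ends := (PySem.List.slice bounds (some 1) none).map (·.1) ++ [(lines.length : Int)]
  let out := (bounds.zip ends).foldl
    (fun acc p =>
      if p.1.2 = "ENGLISH" then
        acc ++ PySem.List.slice lines (some (p.1.1 + 1)) (some p.2)
      else acc) []
  let english := pvNormalizeSpaces (PySem.Str.join "\n" out)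
  if english ≠ "" then english else pvNormalizeSpaces content

-- ===== PRECONDITION & SPEC =====
def Spec_extract_english_block (content : String) (out : String) : Prop := out = extract_english_block_alt content
instance (content : String) (out : String) : Decidable (Spec_extract_english_block content out) := by unfold Spec_extract_english_block; infer_instance

-- ===== CLAIM (what is proved, stated in full; the proofs are below) =====
def Claim_equal_extract_english_block : Prop := ∀ (content : String), Dom_extract_english_block content → Spec_extract_english_block content (extract_english_block content)

-- ===== LEMMAS AND PROOFS =====

-- the English lines A's loop collects, as a structural recursion
def pvG (cur : Option String) : List String → List String
  | [] => []
  | l :: ls =>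
    let tag := PySem.Str.upper (PySem.Str.strip l)
    if pvLANGS.contains tag then pvG (some tag) ls
    else if cur = some "ENGLISH" then l :: pvG cur ls else pvG cur ls

-- the segment-slicing pass of B, as a structural recursion over the boundary table
def pvColl (lines : List String) : List (Int × String) → List String
  | [] => []
  | (s, t) :: rest =>
    let nxt : Int := match rest with | [] => (lines.length : Int) | (s', _) :: _ => s'
    (if t = "ENGLISH" then PySem.List.slice lines (some (s + 1)) (some nxt) else [])
      ++ pvColl lines rest

theorem pvG_cons_tag (cur : Option String) (l : String) (ls : List String)
    (h : pvLANGS.contains (PySem.Str.upper (PySem.Str.strip l)) = true) :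
    pvG cur (l :: ls) = pvG (some (PySem.Str.upper (PySem.Str.strip l))) ls := by
  have hm : PySem.Str.upper (PySem.Str.strip l) ∈ pvLANGS := by simpa using h
  simp [pvG, hm]

theorem pvG_cons_line (cur : Option String) (l : String) (ls : List String)
    (h : pvLANGS.contains (PySem.Str.upper (PySem.Str.strip l)) = false) :
    pvG cur (l :: ls) = if cur = some "ENGLISH" then l :: pvG cur ls else pvG cur ls := by
  have hm : PySem.Str.upper (PySem.Str.strip l) ∉ pvLANGS := by simpa using h
  simp [pvG, hm]

theorem pvA_inv (lines : List String) :
    ∀ (cur : Option String) (d : PySem.Dict String (List String)),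
    (lines.foldl
      (fun (st : Option String × PySem.Dict String (List String)) line =>
        let tag := PySem.Str.upper (PySem.Str.strip line)
        if pvLANGS.contains tag then (some tag, st.2)
        else
          match st.1 with
          | some cur => (st.1, st.2.modify cur [] (· ++ [line]))
          | none => st) (cur, d)).2.getD "ENGLISH" []
      = d.getD "ENGLISH" [] ++ pvG cur lines := by
  induction lines with
  | nil => intro cur d; simp [pvG]
  | cons l ls ih =>
    intro cur d
    cases h : pvLANGS.contains (PySem.Str.upper (PySem.Str.strip l)) with
    | true =>
      rw [pvG_cons_tag cur l ls h]
      simp only [List.foldl_cons, h, reduceIte]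
      exact ih _ d
    | false =>
      rw [pvG_cons_line cur l ls h]
      cases cur with
      | none =>
        simp only [List.foldl_cons, h, Bool.false_eq_true, reduceIte]
        rw [ih none d]
        simp
      | some c =>
        simp only [List.foldl_cons, h, Bool.false_eq_true, reduceIte]
        rw [ih (some c) (d.modify c [] (· ++ [l]))]
        rw [PySem.Dict.getD_modify]
        by_cases hc : c = "ENGLISH"
        · subst hc; simp
        · simp [hc, Ne.symm hc]

theorem pvEnumerate_shift {α : Type} (ls : List α) :
    ∀ s : Int, PySem.List.enumerate ls (s + 1)
      = (PySem.List.enumerate ls s).map (fun p => (p.1 + 1, p.2)) := by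
  induction ls with
  | nil => intro s; simp [PySem.List.enumerate_nil]
  | cons x xs ih =>
    intro s
    rw [PySem.List.enumerate_cons, PySem.List.enumerate_cons, List.map_cons]
    rw [ih (s + 1)]

theorem pvFilterMap_shift (l : List (Int × String)) :
    l.filterMap (fun p =>
      let tag := PySem.Str.upper (PySem.Str.strip p.2)
      if pvLANGS.contains tag then some (p.1 + 1, tag) else none)
    = (l.filterMap (fun p =>
        let tag := PySem.Str.upper (PySem.Str.strip p.2)
        if pvLANGS.contains tag then some (p.1, tag) else none)).map
        (fun p => (p.1 + 1, p.2)) := by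
  induction l with
  | nil => rfl
  | cons q r ih =>
    simp only [List.filterMap_cons]
    cases h : pvLANGS.contains (PySem.Str.upper (PySem.Str.strip q.2)) with
    | true => simp only [reduceIte, List.map_cons, ih]
    | false => simp only [Bool.false_eq_true, reduceIte, ih]

theorem pvBounds_cons (l : String) (ls : List String) :
    pvBounds (l :: ls)
      = (if pvLANGS.contains (PySem.Str.upper (PySem.Str.strip l)) then
          [((0 : Int), PySem.Str.upper (PySem.Str.strip l))] else [])
        ++ (pvBounds ls).map (fun p => (p.1 + 1, p.2)) := by
  unfold pvBounds
  rw [PySem.List.enumerate_cons, pvEnumerate_shift ls 0, List.filterMap_cons,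
      List.filterMap_map]
  have hcomp : (List.filterMap ((fun (p : Int × String) =>
        let tag := PySem.Str.upper (PySem.Str.strip p.2)
        if pvLANGS.contains tag then some (p.1, tag) else none)
          ∘ (fun (p : Int × String) => (p.1 + 1, p.2))) (PySem.List.enumerate ls 0))
      = (PySem.List.enumerate ls 0).filterMap (fun p =>
          let tag := PySem.Str.upper (PySem.Str.strip p.2)
          if pvLANGS.contains tag then some (p.1 + 1, tag) else none) := by
    apply List.filterMap_congr
    intro p _
    simp only [Function.comp_apply]
  rw [hcomp, pvFilterMap_shift]
  cases h : pvLANGS.contains (PySem.Str.upper (PySem.Str.strip l)) with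
  | true => simp only [h, reduceIte, List.singleton_append]
  | false => simp only [h, Bool.false_eq_true, reduceIte, List.nil_append]

theorem pvBounds_nonneg (lines : List String) :
    ∀ p ∈ pvBounds lines, 0 ≤ p.1 := by
  intro p hp
  simp only [pvBounds, List.mem_filterMap] at hp
  obtain ⟨q, hq, hpq⟩ := hp
  rw [PySem.List.mem_enumerate_iff] at hq
  obtain ⟨k, hk, rfl⟩ := hq
  split at hpq
  · cases hpq; simp
  · exact absurd hpq (by simp)

-- slicing with all indices shifted by one past a cons
theorem pvSlice_cons {α : Type} (x : α) (xs : List α) (a b : Int)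
    (ha : 0 ≤ a) (hb : 0 ≤ b) :
    PySem.List.slice (x :: xs) (some (a + 1)) (some (b + 1))
      = PySem.List.slice xs (some a) (some b) := by
  rw [PySem.List.slice_toNat (x :: xs) (by omega) (by omega),
      PySem.List.slice_toNat xs ha hb]
  have h1 : (a + 1).toNat = a.toNat + 1 := by omega
  have h2 : (b + 1).toNat = b.toNat + 1 := by omega
  simp [h1, h2]

theorem pvColl_shift (l : String) (ls : List String) :
    ∀ bs : List (Int × String), (∀ p ∈ bs, 0 ≤ p.1) →
    pvColl (l :: ls) (bs.map (fun p => (p.1 + 1, p.2))) = pvColl ls bs := by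
  intro bs
  induction bs with
  | nil => intro _; rfl
  | cons b rest ih =>
    intro hnn
    obtain ⟨s, t⟩ := b
    simp only [List.map_cons, pvColl]
    rw [ih (fun p hp => hnn p (List.mem_cons_of_mem _ hp))]
    congr 1
    have hs : 0 ≤ s := hnn (s, t) List.mem_cons_self
    cases rest with
    | nil =>
      simp only [List.map_nil]
      by_cases ht : t = "ENGLISH"
      · simp only [ht, if_pos]
        have hlen : ((l :: ls).length : Int) = (ls.length : Int) + 1 := by
          push_cast [List.length_cons]; ring
        rw [hlen, show s + 1 + 1 = (s + 1) + 1 by ring,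
            pvSlice_cons l ls (s + 1) (ls.length : Int) (by omega) (by positivity)]
      · simp [ht]
    | cons b2 r2 =>
      obtain ⟨s2, t2⟩ := b2
      simp only [List.map_cons]
      by_cases ht : t = "ENGLISH"
      · simp only [ht, if_pos]
        have hs2 : 0 ≤ s2 := hnn (s2, t2) (by simp)
        rw [show s + 1 + 1 = (s + 1) + 1 by ring,
            pvSlice_cons l ls (s + 1) s2 (by omega) hs2]
      · simp [ht]

-- index of the first boundary (length if none)
def pvFirstIdx (lines : List String) : Int :=
  match pvBounds lines with
  | [] => (lines.length : Int)
  | (s, _) :: _ => s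

theorem pvFirstIdx_nonneg (ls : List String) : 0 ≤ pvFirstIdx ls := by
  unfold pvFirstIdx
  cases hbs : pvBounds ls with
  | nil => positivity
  | cons b r => exact pvBounds_nonneg ls b (by rw [hbs]; exact List.mem_cons_self)

theorem pvG_eq_coll (lines : List String) :
    ∀ cur : Option String,
    pvG cur lines
      = (if cur = some "ENGLISH" then lines.take (pvFirstIdx lines).toNat else [])
        ++ pvColl lines (pvBounds lines) := by
  induction lines with
  | nil =>
    intro cur
    simp [pvG, pvColl, pvBounds, PySem.List.enumerate_nil, pvFirstIdx]
  | cons l ls ih =>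
    intro cur
    have hnn := pvBounds_nonneg ls
    have hfnn := pvFirstIdx_nonneg ls
    cases h : pvLANGS.contains (PySem.Str.upper (PySem.Str.strip l)) with
    | true =>
      have hm : PySem.Str.upper (PySem.Str.strip l) ∈ pvLANGS := by simpa using h
      have hb : pvBounds (l :: ls)
          = ((0 : Int), PySem.Str.upper (PySem.Str.strip l))
              :: (pvBounds ls).map (fun p => (p.1 + 1, p.2)) := by
        rw [pvBounds_cons]; simp [hm]
      have hfi0 : pvFirstIdx (l :: ls) = 0 := by unfold pvFirstIdx; rw [hb]
      rw [pvG_cons_tag cur l ls h, ih, hb]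
      simp only [pvColl]
      rw [pvColl_shift l ls _ hnn]
      have hnxt : (match (pvBounds ls).map (fun p => (p.1 + 1, p.2)) with
          | [] => (((l :: ls).length : Int))
          | (s', _) :: _ => s') = pvFirstIdx ls + 1 := by
        unfold pvFirstIdx
        cases hbs : pvBounds ls with
        | nil => simp only [List.map_nil, List.length_cons]; push_cast; ring
        | cons b r => obtain ⟨s0, t0⟩ := b; simp
      rw [hnxt]
      have hsl : PySem.List.slice (l :: ls) (some ((0 : Int) + 1)) (some (pvFirstIdx ls + 1))
          = ls.take (pvFirstIdx ls).toNat := by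
        rw [pvSlice_cons l ls 0 (pvFirstIdx ls) le_rfl hfnn,
            PySem.List.slice_toNat ls le_rfl hfnn]
        simp
      have h01 : ((0 : Int) + 1) = (1 : Int) := by ring
      rw [h01] at hsl
      rw [hfi0]
      by_cases hE : PySem.Str.upper (PySem.Str.strip l) = "ENGLISH" <;>
        by_cases hc : cur = some "ENGLISH" <;>
        simp [hE, hc, hsl]
    | false =>
      have hm : PySem.Str.upper (PySem.Str.strip l) ∉ pvLANGS := by simpa using h
      have hb : pvBounds (l :: ls) = (pvBounds ls).map (fun p => (p.1 + 1, p.2)) := by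
        rw [pvBounds_cons]; simp [hm]
      have hfi : pvFirstIdx (l :: ls) = pvFirstIdx ls + 1 := by
        unfold pvFirstIdx
        rw [hb]
        cases hbs : pvBounds ls with
        | nil => simp only [List.map_nil, List.length_cons]; push_cast; ring
        | cons b r => obtain ⟨s0, t0⟩ := b; simp
      rw [pvG_cons_line cur l ls h, hb, pvColl_shift l ls _ hnn, hfi]
      have htk : (l :: ls).take (pvFirstIdx ls + 1).toNat
          = l :: ls.take (pvFirstIdx ls).toNat := by
        have h1 : (pvFirstIdx ls + 1).toNat = (pvFirstIdx ls).toNat + 1 := by omega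
        simp [h1]
      by_cases hc : cur = some "ENGLISH" <;> simp [hc, htk, ih]

-- B's zip/foldl loop computes pvColl over the boundary table
theorem pvFold_eq_coll (lines : List String) :
    ∀ (bs : List (Int × String)) (acc : List String),
    ((bs.zip (bs.tail.map (·.1) ++ [(lines.length : Int)])).foldl
      (fun acc p =>
        if p.1.2 = "ENGLISH" then
          acc ++ PySem.List.slice lines (some (p.1.1 + 1)) (some p.2)
        else acc) acc)
      = acc ++ pvColl lines bs := by
  intro bs
  induction bs with
  | nil => intro acc; simp [pvColl]
  | cons b rest ih =>
    intro acc
    obtain ⟨s, t⟩ := b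
    cases rest with
    | nil =>
      simp only [List.tail_cons, List.map_nil, List.nil_append, List.zip_cons_cons,
        List.zip_nil_right, List.foldl_cons, List.foldl_nil, pvColl]
      by_cases ht : t = "ENGLISH" <;> simp [ht]
    | cons b2 r2 =>
      obtain ⟨s2, t2⟩ := b2
      simp only [List.tail_cons, List.map_cons, List.cons_append,
        List.zip_cons_cons, List.foldl_cons]
      have hrec := ih (if t = "ENGLISH" then acc ++ PySem.List.slice lines (some (s + 1)) (some s2) else acc)
      simp only [List.tail_cons] at hrec
      rw [hrec]
      by_cases ht : t = "ENGLISH" <;> simp [ht, pvColl, List.append_assoc]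

theorem pvInit_getD :
    (pvLANGS.foldl (fun (d : PySem.Dict String (List String)) lang => d.insert lang [])
      PySem.Dict.empty).getD "ENGLISH" [] = [] := by
  simp [pvLANGS, PySem.Dict.getD_insert]

theorem pvOut_eq (lines : List String) :
    (lines.foldl
      (fun (st : Option String × PySem.Dict String (List String)) line =>
        let tag := PySem.Str.upper (PySem.Str.strip line)
        if pvLANGS.contains tag then (some tag, st.2)
        else
          match st.1 with
          | some cur => (st.1, st.2.modify cur [] (· ++ [line]))
          | none => st)
      (none, pvLANGS.foldl (fun d lang => d.insert lang []) PySem.Dict.empty)).2.getD "ENGLISH" []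
    = ((pvBounds lines).zip ((pvBounds lines).tail.map (·.1) ++ [(lines.length : Int)])).foldl
        (fun acc p =>
          if p.1.2 = "ENGLISH" then
            acc ++ PySem.List.slice lines (some (p.1.1 + 1)) (some p.2)
          else acc) [] := by
  rw [pvA_inv lines none _, pvInit_getD, pvFold_eq_coll lines (pvBounds lines) []]
  simp only [List.nil_append]
  rw [pvG_eq_coll lines none]
  simp

-- ===== VERDICT (by name: the statement is the Claim_ definition above) =====
theorem extract_english_block_spec : Claim_equal_extract_english_block := by
  intro content _
  unfold Spec_extract_english_block extract_english_block extract_english_block_alt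
  simp only [PySem.List.slice_from_one]
  rw [pvOut_eq (PySem.Str.splitlines content)]
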